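-- pv_equiv track=rewrite | github.com/lyijin/common | parse_blast_vtable_for_amplicons.py | calculate_tuple_dists
-- ===== SOURCE A (Python) =====
-- def calculate_tuple_dists(f_coord_list, r_coord_list, max_size):
--     """
--     Calculates distances between all F primers and R primers.
--
--     Returns list of F/R primers that create an amplicon below the predefined
--     size.
--     """
--     potential_amplicons = []
--     for f_coords in f_coord_list:
--         for r_coords in r_coord_list:
--             # the trick in figuring out amplicon size is that... it's just the
--             # distance between the first values in both tuples, as exemplified
--             # in the docstring of this script:
--             #   F: (21974802, 21974781); R: (21974733, 21974751)
--             #   i.e., amplicon: (21974802, 21974733)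
--             amplicon_size = abs(f_coords[0] - r_coords[0]) + 1
--
--             if amplicon_size < max_size:
--                 potential_amplicons.append([
--                     min(f_coords[0], r_coords[0]),  # start of amplicon
--                     max(f_coords[0], r_coords[0]),  # end of amplicon
--                     amplicon_size])
--
--     return potential_amplicons
-- ===== SOURCE B (Python) =====
-- def _bisect_gt(coords, x):
--     """First index in sorted `coords` whose value is > x (bisect_right)."""
--     lo, hi = 0, len(coords)
--     while lo < hi:
--         mid = (lo + hi) // 2
--         if x < coords[mid]:
--             hi = mid
--         else:
--             lo = mid + 1
--     return lo
--
--
-- def _bisect_ge(coords, x):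
--     """First index in sorted `coords` whose value is >= x (bisect_left)."""
--     lo, hi = 0, len(coords)
--     while lo < hi:
--         mid = (lo + hi) // 2
--         if coords[mid] < x:
--             lo = mid + 1
--         else:
--             hi = mid
--     return lo
--
--
-- def calculate_tuple_dists(f_coord_list, r_coord_list, max_size):
--     """
--     Same result as the quadratic all-pairs scan, but: index the R primers
--     once by coordinate, binary-search the valid coordinate window per F
--     primer, and re-sort each window by original position to restore the
--     original emission order.
--     """
--     indexed = sorted(((r[0], i) for i, r in enumerate(r_coord_list)),
--                      key=lambda t: t[0])
--     coords = [c for c, _ in indexed]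
--     potential_amplicons = []
--     for f_coords in f_coord_list:
--         f0 = f_coords[0]
--         # |f0 - r0| + 1 < max_size  <=>  lo_excl < r0 < hi_excl
--         lo = _bisect_gt(coords, f0 - max_size + 1)
--         hi = _bisect_ge(coords, f0 + max_size - 1)
--         for r0, _ in sorted(indexed[lo:hi], key=lambda t: t[1]):
--             potential_amplicons.append([min(f0, r0), max(f0, r0),
--                                         abs(f0 - r0) + 1])
--     return potential_amplicons
-- ===== Notes on version B (the rewrite author's own statement) =====
-- stated objective: alternative
-- what changed: Instead of A's all-pairs nested scan, B sorts the R primers by coordinate once, binary-searches the valid coordinate window for each F primer, and re-sorts each window by original position to restore A's emission order.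
-- outside the precondition, e.g. on calculate_tuple_dists([], [()], 5): A returns [], B raises IndexError
import Mathlib
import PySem

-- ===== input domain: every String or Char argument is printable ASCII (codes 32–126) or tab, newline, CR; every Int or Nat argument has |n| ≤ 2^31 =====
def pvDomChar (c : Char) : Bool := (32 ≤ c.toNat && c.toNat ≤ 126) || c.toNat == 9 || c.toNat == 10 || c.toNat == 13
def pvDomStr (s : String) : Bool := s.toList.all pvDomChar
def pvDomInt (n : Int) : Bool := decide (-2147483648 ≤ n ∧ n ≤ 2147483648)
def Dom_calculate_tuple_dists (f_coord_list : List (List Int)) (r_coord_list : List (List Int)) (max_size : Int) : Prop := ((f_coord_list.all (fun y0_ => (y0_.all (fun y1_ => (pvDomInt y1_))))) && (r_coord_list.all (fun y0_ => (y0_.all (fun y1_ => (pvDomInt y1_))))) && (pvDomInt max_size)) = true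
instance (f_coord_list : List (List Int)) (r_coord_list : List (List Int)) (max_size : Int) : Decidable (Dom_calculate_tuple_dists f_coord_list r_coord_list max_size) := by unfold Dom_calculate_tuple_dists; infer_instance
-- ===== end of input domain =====

-- B replaces A's all-pairs scan by one coordinate sort plus a per-F binary-searched window,
-- re-sorted by original position to restore A's emission order (an alternative algorithm, same result).


-- ===== PORT A =====
def calculate_tuple_dists (f_coord_list : List (List Int)) (r_coord_list : List (List Int)) (max_size : Int) : List (List Int) :=
  f_coord_list.foldl (fun acc f_coords =>
    r_coord_list.foldl (fun acc r_coords =>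
      let amplicon_size : Int :=
        |PySem.List.pyGetD f_coords 0 0 - PySem.List.pyGetD r_coords 0 0| + 1
      if amplicon_size < max_size then
        acc ++ [[min (PySem.List.pyGetD f_coords 0 0) (PySem.List.pyGetD r_coords 0 0),
                 max (PySem.List.pyGetD f_coords 0 0) (PySem.List.pyGetD r_coords 0 0),
                 amplicon_size]]
      else acc) acc) []

-- ===== PORT B =====
-- while-loop of Source B's _bisect_gt; lo/hi are always ≥ 0 and mid < len(coords) whenever
-- coords[mid] is read (callers pass hi = len), so Nat bounds and getD are exact here
def pvBisectGtLoop (coords : List Int) (x : Int) (lo hi : Nat) : Nat :=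
  if lo < hi then
    let mid := (lo + hi) / 2
    if x < coords.getD mid 0 then pvBisectGtLoop coords x lo mid
    else pvBisectGtLoop coords x (mid + 1) hi
  else lo
termination_by hi - lo
decreasing_by all_goals omega

def pvBisectGt (coords : List Int) (x : Int) : Nat :=
  pvBisectGtLoop coords x 0 coords.length

-- while-loop of Source B's _bisect_ge; same remark
def pvBisectGeLoop (coords : List Int) (x : Int) (lo hi : Nat) : Nat :=
  if lo < hi then
    let mid := (lo + hi) / 2
    if coords.getD mid 0 < x then pvBisectGeLoop coords x (mid + 1) hi
    else pvBisectGeLoop coords x lo mid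
  else lo
termination_by hi - lo
decreasing_by all_goals omega

def pvBisectGe (coords : List Int) (x : Int) : Nat :=
  pvBisectGeLoop coords x 0 coords.length

def calculate_tuple_dists_alt (f_coord_list : List (List Int)) (r_coord_list : List (List Int)) (max_size : Int) : List (List Int) :=
  let indexed := PySem.List.sorted
    ((PySem.List.enumerate r_coord_list).map (fun p => (PySem.List.pyGetD p.2 0 0, p.1)))
    (fun t => t.1)
  let coords := indexed.map (fun t => t.1)
  f_coord_list.foldl (fun acc f_coords =>
    let f0 := PySem.List.pyGetD f_coords 0 0
    let lo := pvBisectGt coords (f0 - max_size + 1)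
    let hi := pvBisectGe coords (f0 + max_size - 1)
    (PySem.List.sorted (PySem.List.slice indexed (some (lo : Int)) (some (hi : Int))) (fun t => t.2)).foldl
      (fun acc t => acc ++ [[min f0 t.1, max f0 t.1, |f0 - t.1| + 1]]) acc) []

-- ===== PRECONDITION & SPEC =====
-- Pre_ excludes inputs with an empty inner coordinate list: Python A raises IndexError on f_coords[0]/r_coords[0]
-- wherever it reaches such a row (it only happens to return [] when f_coord_list is empty, where B still raises).
def Pre_calculate_tuple_dists (f_coord_list : List (List Int)) (r_coord_list : List (List Int)) (max_size : Int) : Prop :=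
  (∀ l ∈ f_coord_list, l ≠ []) ∧ (∀ l ∈ r_coord_list, l ≠ [])
instance (f_coord_list : List (List Int)) (r_coord_list : List (List Int)) (max_size : Int) : Decidable (Pre_calculate_tuple_dists f_coord_list r_coord_list max_size) := by unfold Pre_calculate_tuple_dists; infer_instance

def pvWitness_calculate_tuple_dists : List (List Int) × List (List Int) × Int := ([[5], [9]], [[7], [100]], 4)

def Spec_calculate_tuple_dists (f_coord_list : List (List Int)) (r_coord_list : List (List Int)) (max_size : Int) (out : List (List Int)) : Prop := out = calculate_tuple_dists_alt f_coord_list r_coord_list max_size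
instance (f_coord_list : List (List Int)) (r_coord_list : List (List Int)) (max_size : Int) (out : List (List Int)) : Decidable (Spec_calculate_tuple_dists f_coord_list r_coord_list max_size out) := by unfold Spec_calculate_tuple_dists; infer_instance

-- ===== CLAIM (what is proved, stated in full; the proofs are below) =====
def Claim_equal_calculate_tuple_dists : Prop := ∀ (f_coord_list : List (List Int)) (r_coord_list : List (List Int)) (max_size : Int), Dom_calculate_tuple_dists f_coord_list r_coord_list max_size → Pre_calculate_tuple_dists f_coord_list r_coord_list max_size → Spec_calculate_tuple_dists f_coord_list r_coord_list max_size (calculate_tuple_dists f_coord_list r_coord_list max_size)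

-- ===== LEMMAS AND PROOFS =====

-- proof-side names for B's intermediate data: the (coordinate, original index) pairs in
-- original order (pvE), sorted by coordinate (pvS), and the sorted coordinates alone (pvC)
def pvE (r : List (List Int)) : List (Int × Int) :=
  (PySem.List.enumerate r).map (fun p => (PySem.List.pyGetD p.2 0 0, p.1))

def pvS (r : List (List Int)) : List (Int × Int) := PySem.List.sorted (pvE r) (fun t => t.1)

def pvC (r : List (List Int)) : List Int := (pvS r).map (fun t => t.1)

def pvRowA (f0 : Int) (rc : List Int) : List Int :=
  [min f0 (PySem.List.pyGetD rc 0 0), max f0 (PySem.List.pyGetD rc 0 0),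
   |f0 - PySem.List.pyGetD rc 0 0| + 1]

-- what A emits for one F primer
def pvAf0 (r : List (List Int)) (ms f0 : Int) : List (List Int) :=
  (r.filter (fun rc => decide (|f0 - PySem.List.pyGetD rc 0 0| + 1 < ms))).map (pvRowA f0)

-- what B emits for one F primer
def pvBf0 (r : List (List Int)) (ms f0 : Int) : List (List Int) :=
  (PySem.List.sorted
    (PySem.List.slice (pvS r) (some (pvBisectGt (pvC r) (f0 - ms + 1) : Int))
      (some (pvBisectGe (pvC r) (f0 + ms - 1) : Int)))
    (fun t => t.2)).map (fun t => [min f0 t.1, max f0 t.1, |f0 - t.1| + 1])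

-- getD is monotone along a ≤-sorted list
theorem pvGetD_mono (a : List Int) (h : a.Pairwise (· ≤ ·)) {i j : Nat} (hij : i ≤ j) (hj : j < a.length) :
    a.getD i 0 ≤ a.getD j 0 := by
  rcases eq_or_lt_of_le hij with rfl | hlt
  · exact le_refl _
  · have hi : i < a.length := lt_trans hlt hj
    rw [List.getD_eq_getElem a 0 hi, List.getD_eq_getElem a 0 hj]
    exact List.pairwise_iff_getElem.mp h i j hi hj hlt

-- the binary-search loops return the boundary index between the ≤ x (resp. < x) prefix and the rest
theorem pvBisectGtLoop_spec (a : List Int) (x : Int) (h : a.Pairwise (· ≤ ·)) :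
    ∀ (k lo hi : Nat), hi - lo = k → lo ≤ hi → hi ≤ a.length →
    (∀ j, j < lo → a.getD j 0 ≤ x) → (∀ j, hi ≤ j → j < a.length → x < a.getD j 0) →
    pvBisectGtLoop a x lo hi ≤ a.length ∧
    (∀ j, j < pvBisectGtLoop a x lo hi → a.getD j 0 ≤ x) ∧
    (∀ j, pvBisectGtLoop a x lo hi ≤ j → j < a.length → x < a.getD j 0) := by
  intro k
  induction k using Nat.strong_induction_on with
  | _ k ih =>
    intro lo hi hk hle hlen hlo hhi
    rw [pvBisectGtLoop]
    by_cases hcase : lo < hi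
    · simp only [hcase, if_true]
      set mid := (lo + hi) / 2 with hmid
      have hmlt : mid < hi := by omega
      have hmge : lo ≤ mid := by omega
      by_cases hx : x < a.getD mid 0
      · simp only [hx, if_true]
        refine ih (mid - lo) (by omega) lo mid rfl (by omega) (by omega) hlo ?_
        intro j hj hjlen
        exact lt_of_lt_of_le hx (pvGetD_mono a h hj hjlen)
      · simp only [hx, if_false]
        refine ih (hi - (mid + 1)) (by omega) (mid + 1) hi rfl (by omega) hlen ?_ hhi
        intro j hj
        have : a.getD j 0 ≤ a.getD mid 0 := pvGetD_mono a h (by omega) (by omega)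
        omega
    · simp only [hcase, if_false]
      have : lo = hi := by omega
      subst this
      exact ⟨by omega, hlo, hhi⟩

theorem pvBisectGeLoop_spec (a : List Int) (x : Int) (h : a.Pairwise (· ≤ ·)) :
    ∀ (k lo hi : Nat), hi - lo = k → lo ≤ hi → hi ≤ a.length →
    (∀ j, j < lo → a.getD j 0 < x) → (∀ j, hi ≤ j → j < a.length → x ≤ a.getD j 0) →
    pvBisectGeLoop a x lo hi ≤ a.length ∧
    (∀ j, j < pvBisectGeLoop a x lo hi → a.getD j 0 < x) ∧
    (∀ j, pvBisectGeLoop a x lo hi ≤ j → j < a.length → x ≤ a.getD j 0) := by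
  intro k
  induction k using Nat.strong_induction_on with
  | _ k ih =>
    intro lo hi hk hle hlen hlo hhi
    rw [pvBisectGeLoop]
    by_cases hcase : lo < hi
    · simp only [hcase, if_true]
      set mid := (lo + hi) / 2 with hmid
      have hmlt : mid < hi := by omega
      have hmge : lo ≤ mid := by omega
      by_cases hx : a.getD mid 0 < x
      · simp only [hx, if_true]
        refine ih (hi - (mid + 1)) (by omega) (mid + 1) hi rfl (by omega) hlen ?_ hhi
        intro j hj
        have : a.getD j 0 ≤ a.getD mid 0 := pvGetD_mono a h (by omega) (by omega)
        omega
      · simp only [hx, if_false]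
        refine ih (mid - lo) (by omega) lo mid rfl (by omega) (by omega) hlo ?_
        intro j hj hjlen
        exact le_trans (not_lt.mp hx) (pvGetD_mono a h hj hjlen)
    · simp only [hcase, if_false]
      have : lo = hi := by omega
      subst this
      exact ⟨by omega, hlo, hhi⟩

-- a two-sided index window on a list is its filter by the corresponding interval predicate
theorem pvWindow_eq_filter (s : List (Int × Int)) (L U : Int) (t1 t2 : Nat)
    (h2 : t2 ≤ s.length)
    (hA : ∀ j, (hj : j < s.length) → j < t1 → (s[j]).1 ≤ L)
    (hB : ∀ j, (hj : j < s.length) → t1 ≤ j → L < (s[j]).1)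
    (hC : ∀ j, (hj : j < s.length) → j < t2 → (s[j]).1 < U)
    (hD : ∀ j, (hj : j < s.length) → t2 ≤ j → U ≤ (s[j]).1) :
    (s.drop t1).take (t2 - t1) = s.filter (fun p => decide (L < p.1 ∧ p.1 < U)) := by
  by_cases hord : t2 ≤ t1
  · have hz : t2 - t1 = 0 := by omega
    rw [hz, List.take_zero]
    symm
    rw [List.filter_eq_nil_iff]
    intro p hp
    obtain ⟨j, hj, rfl⟩ := List.mem_iff_getElem.mp hp
    simp only [decide_eq_true_eq, not_and, not_lt]
    intro hL
    rcases lt_or_ge j t1 with hjt | hjt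
    · exact absurd hL (not_lt.mpr (hA j hj hjt))
    · exact hD j hj (by omega)
  · have hord' : t1 < t2 := by omega
    conv_rhs => rw [← List.take_append_drop t1 s, List.filter_append]
    have e1 : (s.take t1).filter (fun p => decide (L < p.1 ∧ p.1 < U)) = [] := by
      rw [List.filter_eq_nil_iff]
      intro p hp
      obtain ⟨j, hj, rfl⟩ := List.mem_iff_getElem.mp hp
      have hjl : j < t1 := by
        have := hj; simp [List.length_take] at this; omega
      have hje : j < s.length := by omega
      rw [List.getElem_take]
      simp only [decide_eq_true_eq, not_and, not_lt]
      intro hL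
      exact absurd hL (not_lt.mpr (hA j hje hjl))
    rw [e1, List.nil_append]
    conv_rhs => rw [← List.take_append_drop (t2 - t1) (s.drop t1), List.filter_append]
    have e3 : (s.drop t1).drop (t2 - t1) = s.drop t2 := by
      rw [List.drop_drop]; congr 1; omega
    have e2 : ((s.drop t1).take (t2 - t1)).filter (fun p => decide (L < p.1 ∧ p.1 < U))
        = (s.drop t1).take (t2 - t1) := by
      rw [List.filter_eq_self]
      intro p hp
      obtain ⟨j, hj, rfl⟩ := List.mem_iff_getElem.mp hp
      have hj' := hj
      simp only [List.length_take, List.length_drop, lt_min_iff] at hj'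
      have hje : t1 + j < s.length := by omega
      rw [List.getElem_take, List.getElem_drop]
      simp only [decide_eq_true_eq]
      exact ⟨hB (t1 + j) hje (by omega), hC (t1 + j) hje (by omega)⟩
    have e4 : (s.drop t2).filter (fun p => decide (L < p.1 ∧ p.1 < U)) = [] := by
      rw [List.filter_eq_nil_iff]
      intro p hp
      obtain ⟨j, hj, rfl⟩ := List.mem_iff_getElem.mp hp
      have hje : t2 + j < s.length := by
        have := hj; simp [List.length_drop] at this; omega
      rw [List.getElem_drop]
      simp only [decide_eq_true_eq, not_and, not_lt]
      intro _
      exact hD (t2 + j) hje (by omega)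
    rw [e2, e3, e4, List.append_nil]

-- A's amplicon test is exactly B's open coordinate window
theorem pvCond_iff (f0 c ms : Int) : (|f0 - c| + 1 < ms) ↔ (f0 - ms + 1 < c ∧ c < f0 + ms - 1) := by
  rcases abs_cases (f0 - c) with ⟨h1, h2⟩ | ⟨h1, h2⟩ <;> omega

-- for each F primer, B's window (re-sorted by original index) emits exactly A's rows
theorem pvPerF (r : List (List Int)) (ms f0 : Int) : pvBf0 r ms f0 = pvAf0 r ms f0 := by
  have hs : (pvS r).Pairwise (fun a b => a.1 ≤ b.1) := PySem.List.sorted_pairwise _ _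
  have hclen : (pvC r).length = (pvS r).length := by rw [pvC]; exact List.length_map _
  have hcget : ∀ (j : Nat), (hj : j < (pvS r).length) → (pvC r).getD j 0 = ((pvS r)[j]).1 := by
    intro j hj
    rw [pvC, List.getD_eq_getElem _ 0 (by simpa [pvC] using (hclen ▸ hj)), List.getElem_map]
  have hcsort : (pvC r).Pairwise (· ≤ ·) := by
    rw [pvC]; exact List.pairwise_map.mpr hs
  obtain ⟨ht1len, ht1a, ht1b⟩ :=
    pvBisectGtLoop_spec (pvC r) (f0 - ms + 1) hcsort (pvC r).length 0 (pvC r).length rfl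
      (by omega) (le_refl _) (by omega) (by omega)
  obtain ⟨ht2len, ht2a, ht2b⟩ :=
    pvBisectGeLoop_spec (pvC r) (f0 + ms - 1) hcsort (pvC r).length 0 (pvC r).length rfl
      (by omega) (le_refl _) (by omega) (by omega)
  have hwin := pvWindow_eq_filter (pvS r) (f0 - ms + 1) (f0 + ms - 1)
      (pvBisectGt (pvC r) (f0 - ms + 1)) (pvBisectGe (pvC r) (f0 + ms - 1))
      (by rw [← hclen]; exact ht2len)
      (fun j hj hlt => by rw [← hcget j hj]; exact ht1a j hlt)
      (fun j hj hge => by rw [← hcget j hj]; exact ht1b j hge (by omega))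
      (fun j hj hlt => by rw [← hcget j hj]; exact ht2a j hlt)
      (fun j hj hge => by rw [← hcget j hj]; exact ht2b j hge (by omega))
  rw [pvBf0, PySem.List.slice_natCast, hwin]
  have hperm : ((pvE r).filter (fun p => decide (f0 - ms + 1 < p.1 ∧ p.1 < f0 + ms - 1))).Perm
      ((pvS r).filter (fun p => decide (f0 - ms + 1 < p.1 ∧ p.1 < f0 + ms - 1))) :=
    ((PySem.List.sorted_perm (pvE r) (fun t => t.1) false).filter _).symm
  have hpw : ((pvE r).filter (fun p => decide (f0 - ms + 1 < p.1 ∧ p.1 < f0 + ms - 1))).Pairwise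
      (fun a b => a.2 < b.2) := by
    refine List.Pairwise.filter _ ?_
    rw [pvE]
    exact List.pairwise_map.mpr (PySem.List.pairwise_lt_enumerate r 0)
  rw [PySem.List.sorted_eq_of_perm_of_pairwise_lt _ _ _ hperm hpw]
  rw [pvE, List.filter_map, List.map_map, pvAf0]
  conv_rhs => rw [← PySem.List.map_snd_enumerate r 0, List.filter_map, List.map_map]
  rw [List.filter_congr (fun q _ => ?_)]
  · rfl
  · show decide (f0 - ms + 1 < PySem.List.pyGetD q.2 0 0 ∧ PySem.List.pyGetD q.2 0 0 < f0 + ms - 1)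
      = decide (|f0 - PySem.List.pyGetD q.2 0 0| + 1 < ms)
    exact decide_eq_decide.mpr (pvCond_iff f0 _ ms).symm

-- A's nested loops, per F primer
theorem pvAside (f r : List (List Int)) (ms : Int) :
    calculate_tuple_dists f r ms = f.flatMap (fun fc => pvAf0 r ms (PySem.List.pyGetD fc 0 0)) := by
  rw [calculate_tuple_dists]
  calc f.foldl _ []
      = f.foldl (fun acc fc => acc ++ pvAf0 r ms (PySem.List.pyGetD fc 0 0)) [] :=
        PySem.List.foldl_congr_mem _ _ _ _ (fun acc fc _ =>
          PySem.List.foldl_append_ite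
            (fun rc => |PySem.List.pyGetD fc 0 0 - PySem.List.pyGetD rc 0 0| + 1 < ms)
            (pvRowA (PySem.List.pyGetD fc 0 0)) r acc)
    _ = [] ++ f.flatMap (fun fc => pvAf0 r ms (PySem.List.pyGetD fc 0 0)) :=
        PySem.List.foldl_append_eq_flatMap _ _ _
    _ = _ := List.nil_append _

-- B's loop, per F primer
theorem pvBside (f r : List (List Int)) (ms : Int) :
    calculate_tuple_dists_alt f r ms = f.flatMap (fun fc => pvBf0 r ms (PySem.List.pyGetD fc 0 0)) := by
  rw [calculate_tuple_dists_alt]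
  calc f.foldl _ []
      = f.foldl (fun acc fc => acc ++ pvBf0 r ms (PySem.List.pyGetD fc 0 0)) [] :=
        PySem.List.foldl_congr_mem _ _ _ _ (fun acc fc _ =>
          PySem.List.foldl_append_singleton_eq_map
            (fun t : Int × Int => [min (PySem.List.pyGetD fc 0 0) t.1, max (PySem.List.pyGetD fc 0 0) t.1,
                       |PySem.List.pyGetD fc 0 0 - t.1| + 1]) _ acc)
    _ = [] ++ f.flatMap (fun fc => pvBf0 r ms (PySem.List.pyGetD fc 0 0)) :=
        PySem.List.foldl_append_eq_flatMap _ _ _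
    _ = _ := List.nil_append _

-- ===== VERDICT (by name: the statement is the Claim_ definition above) =====
theorem calculate_tuple_dists_spec : Claim_equal_calculate_tuple_dists := by
  intro f_coord_list r_coord_list max_size _ _
  unfold Spec_calculate_tuple_dists
  rw [pvAside, pvBside]
  simp only [pvPerF]
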